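-- pv_equiv track=rewrite | github.com/magicfly/SentimentClassification | PyNLPIR_Test_SVM.py | check
-- ===== SOURCE A (Python) =====
-- import string
--
-- def check(a):
-- 	nums = string.digits
-- 	if (type(a) is not str):
-- 		return False
-- 	else:
-- 		for i in a:
-- 			if i in nums:
-- 				return True
-- 		return False
-- ===== SOURCE B (Python) =====
-- import string
--
-- def check(a):
--     if type(a) is not str:
--         return False
--     stripped = a.translate({ord(d): None for d in string.digits})
--     return len(stripped) != len(a)
-- ===== Notes on version B (the rewrite author's own statement) =====
-- stated objective: faster
-- what changed: Instead of scanning characters with an early-exit membership loop, B deletes all ASCII digits from the string via str.translate (C-level) and reports whether the length shrank.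
import Mathlib
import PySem

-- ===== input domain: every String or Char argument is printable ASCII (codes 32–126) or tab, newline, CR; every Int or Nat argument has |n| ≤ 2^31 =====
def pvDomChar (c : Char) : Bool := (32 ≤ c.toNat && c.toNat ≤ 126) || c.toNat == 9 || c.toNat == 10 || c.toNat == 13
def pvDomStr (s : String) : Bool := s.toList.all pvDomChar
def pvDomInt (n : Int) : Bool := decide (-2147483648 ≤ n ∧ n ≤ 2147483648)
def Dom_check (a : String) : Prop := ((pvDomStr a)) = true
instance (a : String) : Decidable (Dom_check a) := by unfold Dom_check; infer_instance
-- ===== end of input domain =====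

-- B replaces A's early-exit membership loop by deleting all ASCII digits (str.translate) and
-- comparing lengths (alternative decomposition; same big-O). The Lean argument is typed String,
-- so Python's `type(a) is not str` guard is always False and both ports omit it.

-- ===== PORT A =====
-- for i in a: if i in nums: return True; return False   (nums = string.digits)
def checkLoop (nums : List Char) : List Char → Bool
  | [] => false
  | c :: rest => if nums.contains c then true else checkLoop nums rest

def check (a : String) : Bool :=
  checkLoop "0123456789".toList a.toList

-- ===== PORT B =====
-- stripped = a.translate(delete string.digits); return len(stripped) != len(a)
def check_alt (a : String) : Bool :=
  let stripped := a.toList.filter (fun c => !("0123456789".toList.contains c))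
  stripped.length != a.toList.length

-- ===== PRECONDITION & SPEC =====
def Spec_check (a : String) (out : Bool) : Prop := out = check_alt a
instance (a : String) (out : Bool) : Decidable (Spec_check a out) := by unfold Spec_check; infer_instance

-- ===== CLAIM =====
def Claim_equal_check : Prop := ∀ (a : String), Dom_check a → Spec_check a (check a)

-- ===== LEMMAS AND PROOFS =====

theorem checkLoop_eq_true_iff (nums xs : List Char) :
    checkLoop nums xs = true ↔ ∃ c ∈ xs, c ∈ nums := by
  induction xs with
  | nil => simp [checkLoop]
  | cons c rest ih =>
    simp only [checkLoop, List.mem_cons]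
    by_cases h : c ∈ nums
    · simp [h]
    · have h' : nums.contains c = false := by simpa using h
      rw [h', if_neg (by simp), ih]
      constructor
      · rintro ⟨d, hd, hdn⟩; exact ⟨d, Or.inr hd, hdn⟩
      · rintro ⟨d, hd | hd, hdn⟩
        · exact absurd (hd ▸ hdn) h
        · exact ⟨d, hd, hdn⟩

theorem filter_length_ne_iff (p : Char → Bool) (xs : List Char) :
    ((xs.filter p).length != xs.length) = true ↔ ∃ c ∈ xs, p c = false := by
  induction xs with
  | nil => simp
  | cons c rest ih =>
    by_cases h : p c = true
    · simpa [List.filter, h] using ih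
    · have hle : (rest.filter p).length ≤ rest.length := List.length_filter_le _ _
      have h' : p c = false := by simpa using h
      constructor
      · intro _; exact ⟨c, by simp, h'⟩
      · intro _
        simp only [List.filter, h', List.length_cons, bne_iff_ne, ne_eq]
        omega

theorem check_eq_alt (a : String) : check a = check_alt a := by
  unfold check check_alt
  apply Bool.eq_iff_iff.mpr
  rw [checkLoop_eq_true_iff, filter_length_ne_iff]
  constructor
  · rintro ⟨c, hc, hcn⟩
    refine ⟨c, hc, ?_⟩
    simp only [Bool.not_eq_false', List.contains_eq_mem, decide_eq_true_eq]
    exact hcn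
  · rintro ⟨c, hc, hcn⟩
    refine ⟨c, hc, ?_⟩
    simp only [Bool.not_eq_false', List.contains_eq_mem, decide_eq_true_eq] at hcn
    exact hcn

-- ===== VERDICT =====
theorem check_spec : Claim_equal_check := by
  intro a _
  exact check_eq_alt a
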